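-- pv_equiv track=rewrite | github.com/meelgroup/RelNet | relnet/cnf_parser.py | _ind_set
-- ===== SOURCE A (Python) =====
-- def _ind_set(ind_list):
--     # signals sampling set to ApproxMC
--     s = 'c ind '
--     counter = 0
--     for i in ind_list:
--         if counter == 10:
--             counter = 0
--             s += '0\nc ind '
--         counter += 1
--         s += '%s ' % str(i)
--     s += '0\n'
--     return s
-- ===== SOURCE B (Python) =====
-- def _ind_set(ind_list):
--     # partition-then-format: emit one 'c ind ... 0\n' line per chunk of 10
--     out = ''
--     pos = 0
--     while True:
--         out += 'c ind ' + ''.join('%s ' % str(i) for i in ind_list[pos:pos + 10]) + '0\n'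
--         pos += 10
--         if pos >= len(ind_list):
--             break
--     return out
-- ===== Notes on version B (the rewrite author's own statement) =====
-- stated objective: alternative
-- what changed: Replaces the counter-driven flat accumulator (reset-and-splice '0\nc ind ' mid-string every 10th element) with an explicit partition into chunks of 10 via slicing, formatting each chunk as one complete line with a per-chunk join.
import Mathlib
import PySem

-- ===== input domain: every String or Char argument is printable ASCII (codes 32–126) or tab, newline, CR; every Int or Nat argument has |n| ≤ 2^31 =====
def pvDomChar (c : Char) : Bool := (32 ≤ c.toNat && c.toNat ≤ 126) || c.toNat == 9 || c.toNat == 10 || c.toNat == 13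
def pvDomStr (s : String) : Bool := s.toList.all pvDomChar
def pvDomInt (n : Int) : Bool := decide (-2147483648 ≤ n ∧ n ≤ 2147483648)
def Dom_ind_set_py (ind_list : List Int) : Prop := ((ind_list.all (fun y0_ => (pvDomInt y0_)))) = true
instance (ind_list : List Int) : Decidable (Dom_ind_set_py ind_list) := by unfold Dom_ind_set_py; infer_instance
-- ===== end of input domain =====

-- B replaces A's counter-driven flat accumulator by a partition-into-chunks-of-10 loop
-- formatting one complete line per chunk (objective: alternative decomposition, same cost).

-- ===== PORT A =====
-- the for-loop of A, state (s, counter), branches in source order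
def ind_set_loop : List Int → String → Int → String
  | [], s, _ => s
  | i :: t, s, counter =>
      let sc : String × Int := if counter == 10 then (s ++ "0\nc ind ", 0) else (s, counter)
      ind_set_loop t (sc.1 ++ PySem.Int.toStr i ++ " ") (sc.2 + 1)

def ind_set_py (ind_list : List Int) : String :=
  ind_set_loop ind_list "c ind " 0 ++ "0\n"

-- ===== PORT B =====
-- 'c ind ' + ''.join('%s ' % str(i) for i in batch) + '0\n'
def pvChunkLine (batch : List Int) : String :=
  "c ind " ++ PySem.Str.join "" (batch.map (fun i => PySem.Int.toStr i ++ " ")) ++ "0\n"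

-- B's while-loop: out += line for chunk ind_list[pos:pos+10]; pos += 10; stop when pos >= len
def pvAltLoop (l : List Int) (pos : Nat) (out : String) : String :=
  let out' := out ++ pvChunkLine (PySem.List.slice l (some (pos : Int)) (some ((pos : Int) + 10)))
  if pos + 10 ≥ l.length then out' else pvAltLoop l (pos + 10) out'
termination_by l.length - pos

def ind_set_py_alt (ind_list : List Int) : String :=
  pvAltLoop ind_list 0 ""

-- ===== PRECONDITION & SPEC =====
def Spec_ind_set_py (ind_list : List Int) (out : String) : Prop := out = ind_set_py_alt ind_list
instance (ind_list : List Int) (out : String) : Decidable (Spec_ind_set_py ind_list out) := by unfold Spec_ind_set_py; infer_instance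

-- ===== CLAIM (what is proved, stated in full; the proofs are below) =====
def Claim_equal_ind_set_py : Prop := ∀ (ind_list : List Int), Dom_ind_set_py ind_list → Spec_ind_set_py ind_list (ind_set_py ind_list)

-- ===== LEMMAS AND PROOFS =====

theorem pv_lit_split : ("0\nc ind " : String) = "0\n" ++ "c ind " := by rfl

-- proof-side normal form of B: one line per chunk of 10, recursion on the rest
def pvBspec (r : List Int) : String :=
  pvChunkLine (r.take 10) ++ (if h : r.drop 10 = [] then "" else pvBspec (r.drop 10))
termination_by r.length
decreasing_by
  have hgt : r.length > 10 := by
    by_contra hle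
    exact h (List.drop_eq_nil_iff.mpr (by omega))
  simp [List.length_drop]
  omega

theorem pv_join_nil : PySem.Str.join "" ([] : List String) = "" := by
  simp [PySem.Str.join, PySem.Chars.join, List.intercalate]

theorem pv_join_cons (a : String) (l : List String) :
    PySem.Str.join "" (a :: l) = a ++ PySem.Str.join "" l := by
  cases l <;>
    simp [PySem.Str.join, PySem.Chars.join, List.intercalate, String.ofList_append]

-- A's loop (plus the trailing "0\n") computes exactly B's chunked output
theorem pv_loop_eq (n : Nat) : ∀ (l : List Int), l.length ≤ n → ∀ (s : String) (k : Nat), k ≤ 10 →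
    ind_set_loop l s (k : Int) ++ "0\n" =
      s ++ PySem.Str.join "" ((l.take (10 - k)).map (fun i => PySem.Int.toStr i ++ " ")) ++ "0\n" ++
        (if l.drop (10 - k) = [] then "" else pvBspec (l.drop (10 - k))) := by
  induction n with
  | zero =>
    intro l hl s k hk
    have : l = [] := List.eq_nil_of_length_eq_zero (by omega)
    subst this
    simp [ind_set_loop, pv_join_nil]
  | succ n ih =>
    intro l hl s k hk
    cases l with
    | nil => simp [ind_set_loop, pv_join_nil]
    | cons i t =>
      by_cases hk10 : k = 10
      · subst hk10
        have h1 : ((10 : Nat) : Int) == (10 : Int) := by decide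
        show ind_set_loop (i :: t) s ((10 : Nat) : Int) ++ "0\n" = _
        rw [ind_set_loop]
        simp only [h1, if_pos, Nat.sub_self, List.take_zero, List.drop_zero]
        have h2 : (0 : Int) + 1 = ((1 : Nat) : Int) := by norm_num
        rw [h2, ih t (by simpa using Nat.lt_succ_iff.mp (by simpa using hl)) _ 1 (by omega)]
        conv_rhs => rw [pvBspec.eq_def]
        have ht10 : (i :: t).take 10 = i :: t.take 9 := by
          simp [List.take_succ_cons]
        have hd10 : (i :: t).drop 10 = t.drop 9 := by
          simp [List.drop_succ_cons]
        by_cases hnil : t.drop 9 = [] <;>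
          (simp [ht10, hd10, hnil, pvChunkLine, pv_join_cons, pv_join_nil,
             String.append_assoc, String.append_empty]
           rw [pv_lit_split, String.append_assoc])
      · have hklt : k < 10 := lt_of_le_of_ne hk hk10
        have h1 : (((k : Nat) : Int) == (10 : Int)) = false := by
          simp; omega
        rw [ind_set_loop]
        simp only [h1, Bool.false_eq_true, if_neg, not_false_iff]
        have h2 : ((k : Nat) : Int) + 1 = ((k + 1 : Nat) : Int) := by push_cast; ring
        show ind_set_loop t (s ++ PySem.Int.toStr i ++ " ") (((k : Nat) : Int) + 1) ++ "0\n" = _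
        rw [h2, ih t (by simpa using Nat.lt_succ_iff.mp (by simpa using hl)) _ (k + 1) (by omega)]
        have hm : 10 - k = (10 - (k + 1)) + 1 := by omega
        rw [hm, List.take_succ_cons, List.drop_succ_cons]
        simp [pv_join_cons, String.append_assoc]

-- B's while-loop from offset pos computes pvBspec of the remaining suffix
theorem pv_alt_eq (n : Nat) : ∀ (l : List Int) (pos : Nat), l.length - pos ≤ n → ∀ (out : String),
    pvAltLoop l pos out = out ++ pvBspec (l.drop pos) := by
  induction n with
  | zero =>
    intro l pos hn out
    rw [pvAltLoop.eq_def, pvBspec.eq_def]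
    have hstop : pos + 10 ≥ l.length := by omega
    have hsl : PySem.List.slice l (some (pos : Int)) (some ((pos : Int) + 10)) =
        (l.drop pos).take 10 := by
      simpa using PySem.List.slice_natCast_add l pos 10
    have hnil : (l.drop pos).drop 10 = [] := by
      rw [List.drop_drop]
      exact List.drop_eq_nil_iff.mpr (by omega)
    simp [hstop, hsl, hnil, String.append_empty]
  | succ n ih =>
    intro l pos hn out
    rw [pvAltLoop.eq_def, pvBspec.eq_def]
    have hsl : PySem.List.slice l (some (pos : Int)) (some ((pos : Int) + 10)) =
        (l.drop pos).take 10 := by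
      simpa using PySem.List.slice_natCast_add l pos 10
    by_cases hstop : pos + 10 ≥ l.length
    · have hnil : (l.drop pos).drop 10 = [] := by
        rw [List.drop_drop]
        exact List.drop_eq_nil_iff.mpr (by omega)
      simp [hstop, hsl, hnil, String.append_empty]
    · have hnil : ¬ (l.drop pos).drop 10 = [] := by
        rw [List.drop_drop]
        intro h
        exact hstop (by have := List.drop_eq_nil_iff.mp h; omega)
      have hrec := ih l (pos + 10) (by omega)
        (out ++ pvChunkLine ((l.drop pos).take 10))
      rw [List.drop_drop] at hnil ⊢
      simp only [hsl, if_neg hstop]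
      rw [hrec]
      simp [hnil, String.append_assoc]

-- ===== VERDICT (by name: the statement is the Claim_ definition above) =====
theorem ind_set_py_spec : Claim_equal_ind_set_py := by
  intro l _
  show ind_set_py l = ind_set_py_alt l
  have hA : ind_set_py l =
      "c ind " ++ PySem.Str.join "" ((l.take 10).map (fun i => PySem.Int.toStr i ++ " ")) ++ "0\n" ++
        (if l.drop 10 = [] then "" else pvBspec (l.drop 10)) := by
    have := pv_loop_eq l.length l (le_refl _) "c ind " 0 (by omega)
    simpa [ind_set_py] using this
  have hB : ind_set_py_alt l = pvBspec l := by
    have := pv_alt_eq l.length l 0 (by omega) ""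
    simpa [ind_set_py_alt] using this
  rw [hA, hB]
  conv_rhs => rw [pvBspec.eq_def]
  by_cases hnil : l.drop 10 = [] <;>
    simp [hnil, pvChunkLine, String.append_assoc, String.append_empty]
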